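-- pv_equiv track=rewrite | github.com/jiachengxian/aoc | day_6/day6.py | build_directional_graph
-- ===== SOURCE A (Python) =====
-- def build_directional_graph(data):
--     graph = {}
--     for line in data:
--         rel = line.split(')')
--         if rel[0] in graph:
--             graph[rel[0]].append(rel[1])
--         else:
--             graph[rel[0]] = [rel[1]]
--     return graph
-- ===== SOURCE B (Python) =====
-- def build_directional_graph(data):
--     # Parse every line into a (head, tail) pair, then build the result as a
--     # dict comprehension: distinct heads in first-appearance order, each mapped
--     # to the tails of its pairs in order.
--     pairs = [(line.split(')')[0], line.split(')')[1]) for line in data]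
--     heads = list(dict.fromkeys(h for h, _ in pairs))
--     return {h: [t for hh, t in pairs if hh == h] for h in heads}
-- ===== Notes on version B (the rewrite author's own statement) =====
-- stated objective: alternative
-- what changed: Replaces the incremental dict-building loop with a parse-then-group pipeline: collect all (head, tail) pairs first, dedup the heads in first-appearance order, and build the result by one comprehension per head that gathers its tails from the pair list.
import Mathlib
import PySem

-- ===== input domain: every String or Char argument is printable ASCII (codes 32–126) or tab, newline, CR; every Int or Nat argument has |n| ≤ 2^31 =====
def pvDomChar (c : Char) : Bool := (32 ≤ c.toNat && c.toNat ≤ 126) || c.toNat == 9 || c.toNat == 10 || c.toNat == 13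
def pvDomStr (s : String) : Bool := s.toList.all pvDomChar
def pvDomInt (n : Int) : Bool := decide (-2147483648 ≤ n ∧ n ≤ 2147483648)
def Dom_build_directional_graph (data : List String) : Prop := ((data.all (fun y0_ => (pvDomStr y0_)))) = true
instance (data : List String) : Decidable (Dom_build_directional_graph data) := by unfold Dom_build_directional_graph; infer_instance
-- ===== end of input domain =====

-- B replaces A's incremental dict-building loop by a parse-then-group pipeline
-- (pair list, ordered dedup of heads, one tail-gathering pass per head); same
-- values, a different decomposition of the task.

-- ===== PORT A =====
def build_directional_graph (data : List String) : List (String × List String) :=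
  (data.foldl (fun graph line =>
      let rel := (PySem.Str.split? line ")").getD []   -- sep ")" ≠ "" so split? is always some
      if graph.contains (PySem.List.pyGetD rel 0 "") then
        graph.modify (PySem.List.pyGetD rel 0 "") [] (fun v => v ++ [PySem.List.pyGetD rel 1 ""])
      else
        graph.insert (PySem.List.pyGetD rel 0 "") [PySem.List.pyGetD rel 1 ""])
    (PySem.Dict.empty : PySem.Dict String (List String))).items

-- ===== PORT B =====
def build_directional_graph_alt (data : List String) : List (String × List String) :=
  let pairs := data.map (fun line =>
    (PySem.List.pyGetD ((PySem.Str.split? line ")").getD []) 0 "",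
     PySem.List.pyGetD ((PySem.Str.split? line ")").getD []) 1 ""))
  (PySem.List.dedup (pairs.map (fun p => p.1))).map
    (fun h => (h, (pairs.filter (fun p => p.1 == h)).map (fun p => p.2)))

-- ===== PRECONDITION & SPEC =====
-- Pre_ excludes lines without ')': there Python A raises IndexError on rel[1].
def Pre_build_directional_graph (data : List String) : Prop :=
  ∀ line ∈ data, PySem.Str.isIn ")" line = true
instance (data : List String) : Decidable (Pre_build_directional_graph data) := by
  unfold Pre_build_directional_graph; infer_instance
def pvWitness_build_directional_graph : List String := ["A)B", "A)C", "B)D"]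

def Spec_build_directional_graph (data : List String) (out : List (String × List String)) : Prop := out = build_directional_graph_alt data
instance (data : List String) (out : List (String × List String)) : Decidable (Spec_build_directional_graph data out) := by unfold Spec_build_directional_graph; infer_instance

-- ===== CLAIM (what is proved, stated in full; the proofs are below) =====
def Claim_equal_build_directional_graph : Prop := ∀ (data : List String), Dom_build_directional_graph data → Pre_build_directional_graph data → Spec_build_directional_graph data (build_directional_graph data)

-- ===== LEMMAS AND PROOFS =====

-- A's per-line step, seen on the parsed pair, is exactly `modify`: when the key
-- is absent, modify inserts f([]) = [t], which is A's else-branch.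
lemma stepA_eq_modify (g : PySem.Dict String (List String)) (p : String × String) :
    (if g.contains p.1 then g.modify p.1 [] (fun v => v ++ [p.2])
     else g.insert p.1 [p.2])
    = g.modify p.1 [] (fun v => v ++ [p.2]) := by
  cases hc : g.contains p.1 with
  | true => simp
  | false =>
      simp only [Bool.false_eq_true, if_false, PySem.Dict.modify,
        PySem.Dict.getD_of_not_contains g [] hc, List.nil_append]

lemma foldA_eq (data : List String) :
    data.foldl (fun graph line =>
      let rel := (PySem.Str.split? line ")").getD []
      if graph.contains (PySem.List.pyGetD rel 0 "") then
        graph.modify (PySem.List.pyGetD rel 0 "") [] (fun v => v ++ [PySem.List.pyGetD rel 1 ""])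
      else
        graph.insert (PySem.List.pyGetD rel 0 "") [PySem.List.pyGetD rel 1 ""])
      (PySem.Dict.empty : PySem.Dict String (List String))
    = (data.map (fun line =>
        (PySem.List.pyGetD ((PySem.Str.split? line ")").getD []) 0 "",
         PySem.List.pyGetD ((PySem.Str.split? line ")").getD []) 1 ""))).foldl
        (fun g p => g.modify p.1 [] (fun v => v ++ [p.2])) PySem.Dict.empty := by
  rw [List.foldl_map]
  congr 1
  funext g line
  simpa using stepA_eq_modify g
    (PySem.List.pyGetD ((PySem.Str.split? line ")").getD []) 0 "",
     PySem.List.pyGetD ((PySem.Str.split? line ")").getD []) 1 "")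

-- the grouping fold's items, via the PySem grouping lemmas
lemma items_group (pairs : List (String × String)) :
    (pairs.foldl (fun g p => g.modify p.1 [] (fun v => v ++ [p.2]))
        (PySem.Dict.empty : PySem.Dict String (List String))).items
    = (PySem.List.dedup (pairs.map (fun p => p.1))).map
        (fun h => (h, (pairs.filter (fun p => p.1 == h)).map (fun p => p.2))) := by
  have hnd : (pairs.foldl (fun g p => g.modify p.1 [] (fun v => v ++ [p.2]))
      (PySem.Dict.empty : PySem.Dict String (List String))).keys.Nodup := by
    refine PySem.Dict.nodup_keys_foldl_modify_key pairs (fun p => p.1) []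
      (fun _ p v => v ++ [p.2]) PySem.Dict.empty ?_
    simp
  rw [PySem.Dict.items_eq_map_keys _ hnd []]
  have hk := PySem.Dict.keys_foldl_modify_key pairs (fun p => p.1) []
      (fun _ p v => v ++ [p.2]) (PySem.Dict.empty : PySem.Dict String (List String))
  rw [hk, PySem.Dict.keys_empty, PySem.Set.update_nil_left, ← PySem.List.dedup_eq_ofList]
  apply List.map_congr_left
  intro h _
  rw [PySem.Dict.getD_foldl_modify_append]
  simp

theorem build_directional_graph_main (data : List String) :
    build_directional_graph data = build_directional_graph_alt data := by
  unfold build_directional_graph build_directional_graph_alt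
  rw [foldA_eq, items_group]

-- ===== VERDICT (by name: the statement is the Claim_ definition above) =====
theorem build_directional_graph_spec : Claim_equal_build_directional_graph := by
  intro data _ _
  exact build_directional_graph_main data
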